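-- pv_equiv track=rewrite | github.com/csaaron/kattis | mr_anaga/python/mr_anaga.py | jumble
-- ===== SOURCE A (Python) =====
-- def jumble(words):
--     # set up storage
--     solutions = set() # a set of unconfirmed anagrams
--     rejected = set() # a set of confirmed anagrams
--
--     for word in words:
--         # sort the line's characters
--         sorted_word = sortWord(word)
--
--         # If we have seen this anagram before, remove it from solutions and
--         # place in confirmed
--         if sorted_word in solutions:
--             solutions.discard(sorted_word)
--             rejected.add(sorted_word)
--         # if word is not a confirmed anagram add to unconfirmed
--         elif sorted_word not in rejected:
--             solutions.add(sorted_word)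
--
--     return solutions
--
-- def sortWord(word):
--     # sort the letters of the line (returns a list of characters)
--     sorted_chars = sorted(word)
--     # can use join function to turn sorted list of chars back into a
--     # string
--     empty_str = ""
--     sorted_word = empty_str.join(sorted_chars)
--     return sorted_word
-- ===== SOURCE B (Python) =====
-- from collections import Counter
--
-- def jumble(words):
--     counts = Counter("".join(sorted(word)) for word in words)
--     return {sig for sig, c in counts.items() if c == 1}
-- ===== Notes on version B (the rewrite author's own statement) =====
-- stated objective: simpler
-- what changed: A's incremental two-set (unconfirmed solutions / rejected) add-discard bookkeeping is replaced by one Counter over the sorted-letter signatures followed by a filter keeping signatures whose count is exactly 1.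
import Mathlib
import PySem

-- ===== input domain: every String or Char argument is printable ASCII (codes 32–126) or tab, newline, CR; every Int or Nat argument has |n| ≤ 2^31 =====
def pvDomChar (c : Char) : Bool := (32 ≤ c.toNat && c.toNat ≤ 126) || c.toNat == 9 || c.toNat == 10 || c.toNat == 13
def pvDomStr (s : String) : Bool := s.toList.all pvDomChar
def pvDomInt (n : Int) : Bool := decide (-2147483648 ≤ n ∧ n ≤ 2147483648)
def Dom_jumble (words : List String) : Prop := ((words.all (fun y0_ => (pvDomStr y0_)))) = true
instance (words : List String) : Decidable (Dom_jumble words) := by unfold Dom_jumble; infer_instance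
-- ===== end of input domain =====

-- B replaces A's incremental two-set (unconfirmed/rejected) bookkeeping by one
-- Counter over the sorted-letter signatures plus a count == 1 filter (objective: simpler).

-- ===== PORT A =====
def sortWord (word : String) : String :=
  -- sorted(word) then "".join(...)
  String.ofList (PySem.List.sorted word.toList (fun c => c) false)

-- the body of A's for-loop, as a fold step over (solutions, rejected)
def jumbleStep (st : PySem.Set String × PySem.Set String) (word : String) :
    PySem.Set String × PySem.Set String :=
  let sorted_word := sortWord word
  if PySem.Set.contains st.1 sorted_word then
    (PySem.Set.discard st.1 sorted_word, PySem.Set.add st.2 sorted_word)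
  else if PySem.Set.contains st.2 sorted_word then st
  else (PySem.Set.add st.1 sorted_word, st.2)

def jumble (words : List String) : List String :=
  (words.foldl jumbleStep (PySem.Set.empty, PySem.Set.empty)).1

-- ===== PORT B =====
def jumble_alt (words : List String) : List String :=
  let counts : PySem.Dict String Int :=
    PySem.Dict.counter (words.map (fun word => String.ofList (PySem.List.sorted word.toList (fun c => c) false)))
  PySem.Set.ofList ((counts.items.filter (fun p => p.2 == 1)).map (fun p => p.1))

-- ===== PRECONDITION & SPEC =====
def Spec_jumble (words : List String) (out : List String) : Prop := out = jumble_alt words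
instance (words : List String) (out : List String) : Decidable (Spec_jumble words out) := by unfold Spec_jumble; infer_instance

-- ===== CLAIM (what is proved, stated in full; the proofs are below) =====
def Claim_equal_jumble : Prop := ∀ (words : List String), Dom_jumble words → Spec_jumble words (jumble words)

-- ===== LEMMAS AND PROOFS =====

-- Loop invariant for A over the signature list: `solutions` is exactly the
-- signatures of count 1 in first-occurrence order, and `rejected` holds exactly
-- the members of count ≥ 2.
lemma jumble_loop_inv (sigs : List String) :
    (sigs.foldl (fun st sw =>
        if PySem.Set.contains st.1 sw then
          (PySem.Set.discard st.1 sw, PySem.Set.add st.2 sw)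
        else if PySem.Set.contains st.2 sw then st
        else (PySem.Set.add st.1 sw, st.2))
      ((PySem.Set.empty : PySem.Set String), (PySem.Set.empty : PySem.Set String))).1
      = (PySem.Set.ofList sigs).filter (fun k => sigs.count k == 1)
    ∧ ∀ k, k ∈ (sigs.foldl (fun st sw =>
        if PySem.Set.contains st.1 sw then
          (PySem.Set.discard st.1 sw, PySem.Set.add st.2 sw)
        else if PySem.Set.contains st.2 sw then st
        else (PySem.Set.add st.1 sw, st.2))
      ((PySem.Set.empty : PySem.Set String), (PySem.Set.empty : PySem.Set String))).2
        ↔ (k ∈ sigs ∧ 2 ≤ sigs.count k) := by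
  induction sigs using List.reverseRecOn with
  | nil => simp [PySem.Set.empty]
  | append_singleton l x ih =>
    obtain ⟨ihS, ihR⟩ := ih
    rw [List.foldl_append]
    simp only [List.foldl]
    set st := l.foldl (fun st sw =>
        if PySem.Set.contains st.1 sw then
          (PySem.Set.discard st.1 sw, PySem.Set.add st.2 sw)
        else if PySem.Set.contains st.2 sw then st
        else (PySem.Set.add st.1 sw, st.2))
      ((PySem.Set.empty : PySem.Set String), (PySem.Set.empty : PySem.Set String)) with hst
    have hmemS : ∀ k, k ∈ st.1 ↔ (k ∈ l ∧ l.count k = 1) := by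
      intro k
      rw [ihS, List.mem_filter, PySem.Set.mem_ofList]
      simp
    have hcount : ∀ k, (l ++ [x]).count k = l.count k + if k = x then 1 else 0 := by
      intro k
      by_cases h : k = x
      · simp [h, List.count_append]
      · have h' : x ≠ k := fun he => h he.symm
        simp [h, h', List.count_append]
    rcases Nat.lt_or_ge (l.count x) 1 with h0 | h1
    · -- count = 0 : x unseen, added to solutions
      have hx : x ∉ l := by
        intro hm; exact absurd (List.count_pos_iff.mpr hm) (by omega)
      have hxF : x ∉ PySem.Set.ofList l := by simp [PySem.Set.mem_ofList, hx]
      have hxS : PySem.Set.contains st.1 x = false := by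
        rw [Bool.eq_false_iff]; intro hc
        exact hx ((hmemS x).mp ((PySem.Set.contains_iff _ _).mp hc)).1
      have hxR : PySem.Set.contains st.2 x = false := by
        rw [Bool.eq_false_iff]; intro hc
        exact hx ((ihR x).mp ((PySem.Set.contains_iff _ _).mp hc)).1
      rw [hxS, hxR]
      simp only [Bool.false_eq_true, if_false]
      constructor
      · have hxS' : x ∉ List.filter (fun k => List.count k l == 1) (PySem.Set.ofList l) := by
          intro hm; exact hxF (List.mem_of_mem_filter hm)
        have h1 : [x].filter (fun k => (l ++ [x]).count k == 1) = [x] := by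
          simp [hcount, List.count_eq_zero_of_not_mem hx]
        rw [ihS, PySem.Set.add_of_not_mem hxS', PySem.Set.ofList_append_singleton,
          PySem.Set.add_of_not_mem hxF, List.filter_append, h1]
        congr 1
        apply List.filter_congr
        intro k hk
        have hne : k ≠ x := fun he => hx (by simpa [he] using (PySem.Set.mem_ofList l k).mp hk)
        simp [hcount, hne]
      · intro k
        rw [ihR]
        constructor
        · rintro ⟨hkl, hk2⟩
          exact ⟨List.mem_append_left _ hkl, by rw [hcount]; split <;> omega⟩
        · rintro ⟨hkl, hk2⟩
          rw [hcount] at hk2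
          rcases List.mem_append.mp hkl with h | h
          · refine ⟨h, ?_⟩
            by_cases he : k = x
            · exact absurd (he ▸ h) hx
            · simpa [he] using hk2
          · simp at h; subst h
            rw [List.count_eq_zero_of_not_mem hx] at hk2
            simp at hk2
    · rcases Nat.lt_or_ge 1 (l.count x) with h2 | h1'
      · -- count ≥ 2 : x already rejected, state unchanged
        have hx : x ∈ l := List.count_pos_iff.mp (by omega)
        have hxF : x ∈ PySem.Set.ofList l := (PySem.Set.mem_ofList l x).mpr hx
        have hxS : PySem.Set.contains st.1 x = false := by
          rw [Bool.eq_false_iff]; intro hc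
          have := ((hmemS x).mp ((PySem.Set.contains_iff _ _).mp hc)).2
          omega
        have hxR : PySem.Set.contains st.2 x = true := by
          rw [PySem.Set.contains_iff]; exact (ihR x).mpr ⟨hx, by omega⟩
        rw [hxS, hxR]
        simp only [Bool.false_eq_true, if_false, if_true]
        constructor
        · rw [PySem.Set.ofList_append_singleton, PySem.Set.add_of_mem hxF, ihS]
          apply List.filter_congr
          intro k hk
          by_cases he : k = x
          · subst he; simp only [hcount]; simp; omega
          · simp [hcount, he]
        · intro k
          rw [ihR]
          by_cases he : k = x
          · subst he
            simp only [hcount]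
            simp [hx]
            omega
          · simp [hcount, he]
      · -- count = 1 : x moves from solutions to rejected
        have hc1 : l.count x = 1 := by omega
        have hx : x ∈ l := List.count_pos_iff.mp (by omega)
        have hxF : x ∈ PySem.Set.ofList l := (PySem.Set.mem_ofList l x).mpr hx
        have hxS : PySem.Set.contains st.1 x = true := by
          rw [PySem.Set.contains_iff]; exact (hmemS x).mpr ⟨hx, hc1⟩
        rw [hxS]
        simp only [if_true]
        constructor
        · rw [PySem.Set.ofList_append_singleton, PySem.Set.add_of_mem hxF, ihS]
          show List.filter _ (List.filter _ _) = _
          rw [List.filter_filter]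
          apply List.filter_congr
          intro k hk
          by_cases he : k = x
          · subst he; simp [hcount, hc1]
          · simp [hcount, he]
        · intro k
          rw [PySem.Set.mem_add, ihR]
          by_cases he : k = x
          · subst he; simp [hcount, hx, hc1]
          · simp [hcount, he]

lemma jumble_eq_alt (words : List String) : jumble words = jumble_alt words := by
  set sigs := words.map sortWord with hs
  have hA : jumble words
      = (PySem.Set.ofList sigs).filter (fun k => sigs.count k == 1) := by
    rw [jumble, ← (jumble_loop_inv sigs).1, hs, List.foldl_map]
    rfl
  have hB : jumble_alt words
      = PySem.Set.ofList (((PySem.Set.ofList sigs).filter (fun k => (sigs.count k : Int) == 1))) := by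
    rw [jumble_alt,
      show (fun word => String.ofList (PySem.List.sorted word.toList (fun c => c) false)) = sortWord from rfl,
      ← hs]
    simp only [PySem.Dict.items_counter, List.filter_map, List.map_map, Function.comp_def, List.map_id']
  rw [hA, hB]
  have hpred : (PySem.Set.ofList sigs).filter (fun k => ((sigs.count k : Int) == 1))
      = (PySem.Set.ofList sigs).filter (fun k => sigs.count k == 1) := by
    apply List.filter_congr
    intro k _
    simp [Nat.cast_eq_one]
  rw [hpred]
  exact Eq.symm (PySem.Set.ofList_eq_self_of_nodup _ (List.Nodup.filter _ (PySem.Set.nodup_ofList sigs)))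

-- ===== VERDICT (by name: the statement is the Claim_ definition above) =====
theorem jumble_spec : Claim_equal_jumble := by
  intro words _
  unfold Spec_jumble
  exact jumble_eq_alt words
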